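-- pv_equiv track=rewrite | github.com/Alex040704/AS_Python_1sem | 2.3lab/main.py | RemoveCols
-- ===== SOURCE A (Python) =====
-- def RemoveCols(A, K1, K2):
--     M = len(A)
--     if M == 0:
--         return A
--     N = len(A[0])
--
--     if K1 > N:
--         return A
--
--     end_col = min(K2, N)
--
--     result = []
--     for i in range(M):
--         new_row = []
--         for j in range(N):
--             if j < K1 - 1 or j >= end_col:
--                 new_row.append(A[i][j])
--         result.append(new_row)
--
--     return result
-- ===== SOURCE B (Python) =====
-- def RemoveCols(A, K1, K2):
--     if len(A) == 0:
--         return A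
--     N = len(A[0])
--     if K1 > N:
--         return A
--     lo = max(0, K1 - 1)
--     hi = max(lo, min(K2, N))
--     return [row[:lo] + row[hi:] for row in A]
-- ===== Notes on version B (the rewrite author's own statement) =====
-- stated objective: simpler
-- what changed: B replaces the per-element nested loop with a conditional append by a single list comprehension that builds each output row as the concatenation of two contiguous slices row[:lo] + row[hi:], with lo = max(0, K1-1) and hi = max(lo, min(K2, N)).
-- outside the precondition, e.g. on RemoveCols([[1, 2], [3, 4, 5]], 1, 1): A returns [[2], [4]], B returns [[2], [4, 5]]; on RemoveCols([[1, 2], [3]], 1, 1): A raises IndexError, B returns [[2], []]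
import Mathlib
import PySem

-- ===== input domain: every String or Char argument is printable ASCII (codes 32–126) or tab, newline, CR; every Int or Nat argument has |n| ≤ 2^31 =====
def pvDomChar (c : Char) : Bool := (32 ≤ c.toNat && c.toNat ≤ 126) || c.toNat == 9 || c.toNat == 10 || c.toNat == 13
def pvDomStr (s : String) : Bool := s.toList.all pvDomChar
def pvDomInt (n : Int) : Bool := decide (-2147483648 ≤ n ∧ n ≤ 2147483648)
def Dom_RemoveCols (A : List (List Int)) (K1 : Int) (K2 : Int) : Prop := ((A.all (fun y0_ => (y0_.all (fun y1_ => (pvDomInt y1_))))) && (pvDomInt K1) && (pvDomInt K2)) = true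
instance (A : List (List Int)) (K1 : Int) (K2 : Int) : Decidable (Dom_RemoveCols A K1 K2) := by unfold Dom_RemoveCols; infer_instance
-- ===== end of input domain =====

-- B replaces A's per-element nested loop by two contiguous slices per row; equivalence proved on rectangular matrices.

-- ===== PORT A =====
def RemoveCols (A : List (List Int)) (K1 : Int) (K2 : Int) : List (List Int) :=
  let M := A.length
  if M = 0 then A
  else
    let N := (A.headD []).length
    if K1 > (N : Int) then A
    else
      let end_col := min K2 (N : Int)
      (PySem.List.pyRange 0 (M : Int) 1).foldl (fun result i =>
        result ++ [(PySem.List.pyRange 0 (N : Int) 1).foldl (fun new_row j =>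
          if j < K1 - 1 ∨ end_col ≤ j then
            new_row ++ [PySem.List.pyGetD (PySem.List.pyGetD A i []) j 0]
          else new_row) []]) []

-- ===== PORT B =====
def RemoveCols_alt (A : List (List Int)) (K1 : Int) (K2 : Int) : List (List Int) :=
  if A.length = 0 then A
  else
    let N : Int := ((A.headD []).length : Int)
    if K1 > N then A
    else
      let lo := max 0 (K1 - 1)
      let hi := max lo (min K2 N)
      A.map (fun row => PySem.List.slice row none (some lo) ++ PySem.List.slice row (some hi) none)

-- ===== PRECONDITION & SPEC =====
-- Pre_ excludes ragged matrices that do not hit an early-return guard: there A either raises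
-- IndexError (a row shorter than the first) or silently truncates longer rows to the first
-- row's length, an artefact of indexing every row by range(len(A[0])).
def Pre_RemoveCols (A : List (List Int)) (K1 : Int) (K2 : Int) : Prop :=
  A = [] ∨ ((A.headD []).length : Int) < K1 ∨ ∀ row ∈ A, row.length = (A.headD []).length
instance (A : List (List Int)) (K1 : Int) (K2 : Int) : Decidable (Pre_RemoveCols A K1 K2) := by unfold Pre_RemoveCols; infer_instance

def pvWitness_RemoveCols : List (List Int) × Int × Int := ([[1, 2, 3], [4, 5, 6]], 2, 3)

def Spec_RemoveCols (A : List (List Int)) (K1 : Int) (K2 : Int) (out : List (List Int)) : Prop := out = RemoveCols_alt A K1 K2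
instance (A : List (List Int)) (K1 : Int) (K2 : Int) (out : List (List Int)) : Decidable (Spec_RemoveCols A K1 K2 out) := by unfold Spec_RemoveCols; infer_instance

-- ===== CLAIM (what is proved, stated in full; the proofs are below) =====
def Claim_equal_RemoveCols : Prop := ∀ (A : List (List Int)) (K1 : Int) (K2 : Int), Dom_RemoveCols A K1 K2 → Pre_RemoveCols A K1 K2 → Spec_RemoveCols A K1 K2 (RemoveCols A K1 K2)

-- ===== LEMMAS AND PROOFS =====

-- filtering the column range by A's keep-condition yields the two contiguous index ranges B slices
lemma filter_range_split (N K1 K2 : Int) (hN : 0 ≤ N) (hK1 : K1 ≤ N) :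
    (PySem.List.pyRange 0 N 1).filter (fun j => decide (j < K1 - 1 ∨ min K2 N ≤ j)) =
      PySem.List.pyRange 0 (max 0 (K1 - 1)) 1 ++ PySem.List.pyRange (max (max 0 (K1 - 1)) (min K2 N)) N 1 := by
  set lo := max 0 (K1 - 1) with hlo
  set hi := max lo (min K2 N) with hhi
  have h1 : (0 : Int) ≤ lo := le_max_left _ _
  have h2 : lo ≤ hi := le_max_left _ _
  have h3 : hi ≤ N := max_le (by omega) (min_le_right _ _)
  rw [PySem.List.pyRange_one_append 0 lo N h1 (le_trans h2 h3),
      PySem.List.pyRange_one_append lo hi N h2 h3, List.filter_append, List.filter_append]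
  have e1 : (PySem.List.pyRange 0 lo 1).filter (fun j => decide (j < K1 - 1 ∨ min K2 N ≤ j)) =
      PySem.List.pyRange 0 lo 1 := by
    apply List.filter_eq_self.mpr
    intro j hj
    have := PySem.List.mem_pyRange_one.mp hj
    simp only [decide_eq_true_eq]
    left; omega
  have e2 : (PySem.List.pyRange lo hi 1).filter (fun j => decide (j < K1 - 1 ∨ min K2 N ≤ j)) = [] := by
    apply List.filter_eq_nil_iff.mpr
    intro j hj
    have := PySem.List.mem_pyRange_one.mp hj
    simp only [decide_eq_true_eq]
    omega
  have e3 : (PySem.List.pyRange hi N 1).filter (fun j => decide (j < K1 - 1 ∨ min K2 N ≤ j)) =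
      PySem.List.pyRange hi N 1 := by
    apply List.filter_eq_self.mpr
    intro j hj
    have := PySem.List.mem_pyRange_one.mp hj
    simp only [decide_eq_true_eq]
    right; omega
  rw [e1, e2, e3, List.nil_append]

-- mapping row-lookup over a front range is `take`
lemma map_pyGetD_range_take (row : List Int) (lo : Int) (h0 : 0 ≤ lo) (hle : lo ≤ (row.length : Int)) :
    (PySem.List.pyRange 0 lo 1).map (fun j => PySem.List.pyGetD row j 0) = row.take lo.toNat := by
  apply List.ext_getElem
  · rw [List.length_map, PySem.List.length_pyRange_one, List.length_take]
    omega
  · intro k hk hk'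
    have hkl : k < lo.toNat := by
      rw [List.length_map, PySem.List.length_pyRange_one] at hk
      omega
    have hklr : k < (PySem.List.pyRange 0 lo 1).length := by
      rw [PySem.List.length_pyRange_one]; omega
    have hkr : (PySem.List.pyRange 0 lo 1)[k]'hklr = (k : Int) := by
      rw [PySem.List.getElem_pyRange_one]; ring
    rw [List.getElem_map, hkr, PySem.List.pyGetD_eq_getElem row 0 (by omega) (by omega),
        List.getElem_take]
    simp

-- mapping row-lookup over a tail range is `drop`
lemma map_pyGetD_range_drop (row : List Int) (hi : Int) (h0 : 0 ≤ hi) (hle : hi ≤ (row.length : Int)) :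
    (PySem.List.pyRange hi (row.length : Int) 1).map (fun j => PySem.List.pyGetD row j 0) = row.drop hi.toNat := by
  apply List.ext_getElem
  · rw [List.length_map, PySem.List.length_pyRange_one, List.length_drop]
    omega
  · intro k hk hk'
    have hkl : k < ((row.length : Int) - hi).toNat := by
      rw [List.length_map, PySem.List.length_pyRange_one] at hk
      omega
    have hklr : k < (PySem.List.pyRange hi (row.length : Int) 1).length := by
      rw [PySem.List.length_pyRange_one]; omega
    have hkr : (PySem.List.pyRange hi (row.length : Int) 1)[k]'hklr = hi + (k : Int) := by
      rw [PySem.List.getElem_pyRange_one]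
    rw [List.getElem_map, hkr, PySem.List.pyGetD_eq_getElem row 0 (by omega) (by omega),
        List.getElem_drop]
    congr 1
    omega

-- ===== VERDICT (by name: the statement is the Claim_ definition above) =====
theorem RemoveCols_spec : Claim_equal_RemoveCols := by
  intro A K1 K2 _ hpre
  unfold Spec_RemoveCols RemoveCols RemoveCols_alt
  by_cases hA : A.length = 0
  · simp [hA]
  · simp only [hA, if_false]
    set N : Int := ((A.headD []).length : Int) with hN
    by_cases hK1 : K1 > N
    · simp [hK1]
    · simp only [hK1, if_false]
      have hrect : ∀ row ∈ A, row.length = (A.headD []).length := by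
        rcases hpre with h | h | h
        · exact absurd (by simp [h]) hA
        · omega
        · exact h
      rw [PySem.List.foldl_append_singleton_eq_map, List.nil_append]
      have houter : (PySem.List.pyRange 0 (A.length : Int) 1).map
          (fun i => (PySem.List.pyRange 0 N 1).foldl (fun new_row j =>
            if j < K1 - 1 ∨ min K2 N ≤ j then
              new_row ++ [PySem.List.pyGetD (PySem.List.pyGetD A i []) j 0]
            else new_row) []) =
          A.map (fun row => (PySem.List.pyRange 0 N 1).foldl (fun new_row j =>
            if j < K1 - 1 ∨ min K2 N ≤ j then
              new_row ++ [PySem.List.pyGetD row j 0]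
            else new_row) []) := by
        have := PySem.List.map_pyGetD_pyRange_zero A ([] : List Int)
        calc (PySem.List.pyRange 0 (A.length : Int) 1).map
              (fun i => (PySem.List.pyRange 0 N 1).foldl (fun new_row j =>
                if j < K1 - 1 ∨ min K2 N ≤ j then
                  new_row ++ [PySem.List.pyGetD (PySem.List.pyGetD A i []) j 0]
                else new_row) [])
            = ((PySem.List.pyRange 0 (A.length : Int) 1).map
                (fun i => PySem.List.pyGetD A i [])).map
              (fun row => (PySem.List.pyRange 0 N 1).foldl (fun new_row j =>
                if j < K1 - 1 ∨ min K2 N ≤ j then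
                  new_row ++ [PySem.List.pyGetD row j 0]
                else new_row) []) := by
              rw [List.map_map]; rfl
          _ = _ := by
              rw [show (PySem.List.pyRange 0 (A.length : Int) 1).map
                    (fun i => PySem.List.pyGetD A i []) = A from by
                  simpa [PySem.List.len] using PySem.List.map_pyGetD_pyRange_zero A ([] : List Int)]
      rw [houter]
      apply List.map_congr_left
      intro row hrow
      have hlen : (row.length : Int) = N := by
        have := hrect row hrow
        simp [hN, this]
      rw [PySem.List.foldl_append_ite (fun j => j < K1 - 1 ∨ min K2 N ≤ j)
            (fun j => PySem.List.pyGetD row j 0), List.nil_append,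
          filter_range_split N K1 K2 (by positivity) (by omega), List.map_append]
      have hlo0 : (0 : Int) ≤ max 0 (K1 - 1) := le_max_left _ _
      have hloN : max 0 (K1 - 1) ≤ N := by omega
      have hhi0 : (0 : Int) ≤ max (max 0 (K1 - 1)) (min K2 N) := le_trans hlo0 (le_max_left _ _)
      have hhiN : max (max 0 (K1 - 1)) (min K2 N) ≤ N := by
        apply max_le hloN (min_le_right _ _)
      rw [map_pyGetD_range_take row _ hlo0 (by omega),
          show (PySem.List.pyRange (max (max 0 (K1 - 1)) (min K2 N)) N 1) =
            (PySem.List.pyRange (max (max 0 (K1 - 1)) (min K2 N)) (row.length : Int) 1) from by rw [hlen],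
          map_pyGetD_range_drop row _ hhi0 (by omega),
          PySem.List.slice_to row hlo0, PySem.List.slice_from row hhi0]
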